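-- pv_equiv track=rewrite | github.com/ooMia/BOJ | 프로그래머스/1/258712. 가장 많이 받은 선물/가장 많이 받은 선물.py | make_matrix_from_to
-- ===== SOURCE A (Python) =====
-- def make_matrix_from_to(
--     friends_dict,
--     gifts
-- ) -> list:
--     l = friends_dict.keys()
--     res = [[0 for _ in l] for _ in l]
--
--     for gift in gifts:
--         (giver, taker) = gift.split()
--         from_= friends_dict[giver]
--         to_  = friends_dict[taker]
--         res[from_][to_] += 1
--
--     return res
-- ===== SOURCE B (Python) =====
-- def make_matrix_from_to(
--     friends_dict,
--     gifts
-- ) -> list: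
--     # pass 1: tally each (from_index, to_index) pair into a dict
--     counts = {}
--     for gift in gifts:
--         (giver, taker) = gift.split()
--         key = (friends_dict[giver], friends_dict[taker])
--         counts[key] = counts.get(key, 0) + 1
--     # pass 2: materialize the grid and add each aggregated count in
--     n = len(friends_dict)
--     res = [[0] * n for _ in range(n)]
--     for (f, t), c in counts.items():
--         res[f][t] += c
--     return res
-- ===== Notes on version B (the rewrite author's own statement) =====
-- stated objective: alternative
-- what changed: Replaces A's single pass of in-place increments into a preallocated n*n matrix by a two-pass count-then-materialize decomposition: one pass tallies each (from_index, to_index) pair into a dict of counts, then a second pass builds the zero grid and adds each aggregated count into its cell.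
import Mathlib
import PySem

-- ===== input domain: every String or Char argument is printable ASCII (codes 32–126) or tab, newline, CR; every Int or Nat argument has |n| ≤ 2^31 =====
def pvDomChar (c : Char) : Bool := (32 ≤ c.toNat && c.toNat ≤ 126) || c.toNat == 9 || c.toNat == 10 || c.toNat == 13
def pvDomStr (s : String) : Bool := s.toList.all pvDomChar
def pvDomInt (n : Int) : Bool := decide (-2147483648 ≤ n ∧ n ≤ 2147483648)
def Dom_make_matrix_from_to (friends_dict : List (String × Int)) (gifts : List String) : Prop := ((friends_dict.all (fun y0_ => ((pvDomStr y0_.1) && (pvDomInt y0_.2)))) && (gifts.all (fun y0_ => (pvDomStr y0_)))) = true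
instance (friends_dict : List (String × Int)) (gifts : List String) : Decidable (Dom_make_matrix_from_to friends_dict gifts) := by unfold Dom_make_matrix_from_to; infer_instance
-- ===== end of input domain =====

-- B replaces A's per-gift in-place increments into a preallocated matrix by a two-pass
-- count-then-materialize decomposition (tally (from,to) pairs into a dict, then add the
-- aggregated counts into a zero grid); objective: alternative, same cost.


-- ===== PORT A =====
-- the (from,to) index pair a gift contributes, if its processing raises no exception midway
def keyOf (d : PySem.Dict String Int) (g : String) : Option (Int × Int) :=
  match PySem.Str.split₀ g with
  | a :: rest =>
    match rest with
    | [b] =>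
      match (d.get? a, d.get? b) with
      | (some i, some j) => some (i, j)
      | _ => none
    | _ => none
  | [] => none

-- giftOK d g: the processing of gift g raises no exception: it splits into exactly two
-- words, both names are keys of the dict, and both looked-up indices are Python-valid
-- list indices for a list of length n = len(d), i.e. lie in [-n, n).
def giftOK (d : PySem.Dict String Int) (g : String) : Bool :=
  match keyOf d g with
  | some (i, j) =>
    decide (-(d.size : Int) ≤ i ∧ i < (d.size : Int) ∧ -(d.size : Int) ≤ j ∧ j < (d.size : Int))
  | none => false

def make_matrix_from_to (friends_dict : List (String × Int)) (gifts : List String) : List (List Int) :=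
  let d := PySem.Dict.ofList friends_dict
  let l := d.keys
  let res := l.map (fun _ => l.map (fun _ => (0 : Int)))
  gifts.foldl (fun res gift =>
    match PySem.Str.split₀ gift with
    | [giver, taker] =>
      match d.get? giver, d.get? taker with
      | some from_, some to_ =>
        -- res[from_][to_] += 1  (Python indexing: negative wraps, out of range raises; raising inputs excluded by Pre_)
        PySem.List.pySetD res from_
          (PySem.List.pySetD (PySem.List.pyGetD res from_ []) to_
            (PySem.List.pyGetD (PySem.List.pyGetD res from_ []) to_ 0 + 1))
      | _, _ => res          -- Python: KeyError (excluded by Pre_)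
    | _ => res               -- Python: ValueError on tuple unpacking (excluded by Pre_)
  ) res

-- ===== PORT B =====
def make_matrix_from_to_alt (friends_dict : List (String × Int)) (gifts : List String) : List (List Int) :=
  let d := PySem.Dict.ofList friends_dict
  -- pass 1: tally each (from_index, to_index) pair into a dict
  let counts := gifts.foldl (fun counts gift =>
    match PySem.Str.split₀ gift with
    | giver :: rest =>
      match rest with
      | [taker] =>
        match (d.get? giver, d.get? taker) with
        | (some f, some t) => counts.insert (f, t) (counts.getD (f, t) 0 + 1)
        | _ => counts        -- Python: KeyError (excluded by Pre_)
      | _ => counts          -- Python: ValueError on tuple unpacking (excluded by Pre_)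
    | [] => counts           -- Python: ValueError on tuple unpacking (excluded by Pre_)
    ) (PySem.Dict.empty : PySem.Dict (Int × Int) Int)
  -- pass 2: materialize the grid and add each aggregated count in
  let n := d.size
  let res := (PySem.List.pyRange 0 (n : Int) 1).map (fun _ => PySem.List.pyRepeat [(0 : Int)] (n : Int))
  counts.items.foldl (fun res kv =>
    match kv with
    | ((f, t), c) =>
      PySem.List.pySetD res f
        (PySem.List.pySetD (PySem.List.pyGetD res f []) t
          (PySem.List.pyGetD (PySem.List.pyGetD res f []) t 0 + c))) res

-- ===== PRECONDITION & SPEC =====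
-- Pre_ excludes exactly the inputs on which the Python A raises: a gift that does not split
-- into exactly two words (ValueError), a name missing from the dict (KeyError), or a
-- looked-up index outside [-n, n) (IndexError).
def Pre_make_matrix_from_to (friends_dict : List (String × Int)) (gifts : List String) : Prop :=
  gifts.all (giftOK (PySem.Dict.ofList friends_dict)) = true
instance (friends_dict : List (String × Int)) (gifts : List String) : Decidable (Pre_make_matrix_from_to friends_dict gifts) := by unfold Pre_make_matrix_from_to; infer_instance

def pvWitness_make_matrix_from_to : (List (String × Int)) × List String :=
  ([("a", 0), ("b", 1)], ["a b", "b a", "b b"])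

def Spec_make_matrix_from_to (friends_dict : List (String × Int)) (gifts : List String) (out : List (List Int)) : Prop := out = make_matrix_from_to_alt friends_dict gifts
instance (friends_dict : List (String × Int)) (gifts : List String) (out : List (List Int)) : Decidable (Spec_make_matrix_from_to friends_dict gifts out) := by unfold Spec_make_matrix_from_to; infer_instance

-- ===== CLAIM (what is proved, stated in full; the proofs are below) =====
def Claim_equal_make_matrix_from_to : Prop := ∀ (friends_dict : List (String × Int)) (gifts : List String), Dom_make_matrix_from_to friends_dict gifts → Pre_make_matrix_from_to friends_dict gifts → Spec_make_matrix_from_to friends_dict gifts (make_matrix_from_to friends_dict gifts)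

-- ===== LEMMAS AND PROOFS =====

-- Python's normalization of a valid list index i ∈ [-n, n) to a Nat position
def normN (n : Nat) (i : Int) : Nat := (if i < 0 then i + n else i).toNat

def InR (n : Nat) (i : Int) : Prop := -(n : Int) ≤ i ∧ i < (n : Int)

-- res[f][t] += c, with Python indexing
def addC (res : List (List Int)) (f t c : Int) : List (List Int) :=
  PySem.List.pySetD res f
    (PySem.List.pySetD (PySem.List.pyGetD res f []) t
      (PySem.List.pyGetD (PySem.List.pyGetD res f []) t 0 + c))

-- entry (p, q) of a matrix, totalized
def ent (M : List (List Int)) (p q : Nat) : Int := ((M[p]?.getD [])[q]?.getD 0)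

theorem normN_lt (n : Nat) (i : Int) (h : InR n i) : normN n i < n := by
  unfold InR at h; unfold normN; split <;> omega

theorem pyIdx?_inR (n : Nat) (i : Int) (h : InR n i) :
    PySem.List.pyIdx? n i = some (normN n i) := by
  unfold InR at h
  unfold PySem.List.pyIdx? normN
  by_cases h0 : i < 0
  · rw [if_neg (by omega), if_pos (by omega), if_pos h0]
    congr 1
    omega
  · rw [if_pos (by omega), if_pos (by omega), if_neg h0]

theorem pySetD_inR {α : Type} (xs : List α) (n : Nat) (i : Int) (v : α)
    (hn : xs.length = n) (h : InR n i) :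
    PySem.List.pySetD xs i v = xs.set (normN n i) v := by
  subst hn
  simp [PySem.List.pySetD, PySem.List.pySet?, pyIdx?_inR _ _ h]

theorem pyGetD_inR {α : Type} (xs : List α) (n : Nat) (i : Int) (dflt : α)
    (hn : xs.length = n) (h : InR n i) :
    PySem.List.pyGetD xs i dflt = (xs[normN n i]?).getD dflt := by
  subst hn
  simp [PySem.List.pyGetD, PySem.List.pyGet?, pyIdx?_inR _ _ h]

theorem addC_shape_ent (n : Nat) (M : List (List Int)) (f t c : Int)
    (hlen : M.length = n) (hrows : ∀ row ∈ M, row.length = n)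
    (hf : InR n f) (ht : InR n t) :
    (addC M f t c).length = n ∧ (∀ row ∈ addC M f t c, row.length = n) ∧
    ∀ p q : Nat, ent (addC M f t c) p q =
      ent M p q + (if normN n f = p ∧ normN n t = q then c else 0) := by
  have hpf : normN n f < n := normN_lt n f hf
  have hrowlen : (M[normN n f]?.getD []).length = n := by
    rw [List.getElem?_eq_getElem (by omega)]
    exact hrows _ (List.getElem_mem _)
  have hqt : normN n t < n := normN_lt n t ht
  have hA : addC M f t c =
      M.set (normN n f)
        ((M[normN n f]?.getD []).set (normN n t)
          (((M[normN n f]?.getD [])[normN n t]?.getD 0) + c)) := by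
    unfold addC
    rw [pyGetD_inR M n f [] hlen hf, pyGetD_inR _ n t 0 hrowlen ht,
        pySetD_inR _ n t _ hrowlen ht, pySetD_inR M n f _ hlen hf]
  refine ⟨by rw [hA]; simp [hlen], ?_, ?_⟩
  · intro row hmem
    rw [hA] at hmem
    rcases List.mem_or_eq_of_mem_set hmem with h | h
    · exact hrows _ h
    · rw [h]
      simp [hrowlen]
  · intro p q
    unfold ent
    rw [hA, List.getElem?_set]
    by_cases hp : normN n f = p
    · rw [if_pos hp, if_pos (by omega)]
      simp only [Option.getD_some]
      rw [List.getElem?_set]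
      by_cases hq : normN n t = q
      · rw [if_pos hq, if_pos (by omega)]
        simp only [Option.getD_some]
        rw [← hp, ← hq]
        simp
      · rw [if_neg hq, ← hp]
        simp [hq]
    · rw [if_neg hp]
      simp [hp]

theorem fold_addC (n : Nat) (ps : List ((Int × Int) × Int)) :
    ∀ (M : List (List Int)), M.length = n → (∀ row ∈ M, row.length = n) →
    (∀ x ∈ ps, InR n x.1.1 ∧ InR n x.1.2) →
    (ps.foldl (fun res x => addC res x.1.1 x.1.2 x.2) M).length = n ∧
    (∀ row ∈ ps.foldl (fun res x => addC res x.1.1 x.1.2 x.2) M, row.length = n) ∧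
    ∀ p q : Nat,
      ent (ps.foldl (fun res x => addC res x.1.1 x.1.2 x.2) M) p q =
      ent M p q + (ps.map (fun x => if normN n x.1.1 = p ∧ normN n x.1.2 = q then x.2 else 0)).sum := by
  induction ps with
  | nil => intro M h1 h2 _; exact ⟨h1, h2, by simp⟩
  | cons x rest ih =>
    intro M h1 h2 hps
    have hx := hps x (List.mem_cons_self)
    obtain ⟨s1, s2, s3⟩ := addC_shape_ent n M x.1.1 x.1.2 x.2 h1 h2 hx.1 hx.2
    obtain ⟨r1, r2, r3⟩ := ih (addC M x.1.1 x.1.2 x.2) s1 s2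
      (fun y hy => hps y (List.mem_cons_of_mem _ hy))
    refine ⟨by simpa using r1, by simpa using r2, ?_⟩
    intro p q
    simp only [List.foldl_cons, List.map_cons, List.sum_cons]
    rw [r3 p q, s3 p q]
    ring

theorem sum_ite_mem {α : Type} [DecidableEq α] (P : α → Prop) [DecidablePred P] (a : α) :
    ∀ (S : List α), S.Nodup → a ∈ S →
    (S.map (fun k => if P k then (if a = k then (1 : Int) else 0) else 0)).sum =
      if P a then 1 else 0 := by
  intro S
  induction S with
  | nil => intro _ h; simp at h
  | cons b rest ih =>
    intro hnd hmem
    simp only [List.map_cons, List.sum_cons]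
    rcases List.mem_cons.mp hmem with h | h
    · subst h
      have hrest : (rest.map (fun k => if P k then (if a = k then (1 : Int) else 0) else 0)).sum = 0 := by
        have : ∀ k ∈ rest, (if P k then (if a = k then (1 : Int) else 0) else 0) = 0 := by
          intro k hk
          have : a ≠ k := fun h => (List.nodup_cons.mp hnd).1 (h ▸ hk)
          simp [this]
        rw [List.sum_eq_zero]
        intro y hy
        rcases List.mem_map.mp hy with ⟨k, hk, hky⟩
        rw [← hky]; exact this k hk
      rw [hrest]; simp
    · have hba : a ≠ b := fun hab => (List.nodup_cons.mp hnd).1 (hab ▸ h)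
      rw [ih (List.nodup_cons.mp hnd).2 h]
      simp [fun hh : a = b => hba hh]

theorem countP_eq_sum_counts {α : Type} [DecidableEq α] [BEq α] [LawfulBEq α]
    (P : α → Prop) [DecidablePred P] (S : List α) (hS : S.Nodup) :
    ∀ (ks : List α), (∀ x ∈ ks, x ∈ S) →
    (S.map (fun k => if P k then ((ks.count k : Int)) else 0)).sum =
      (ks.countP (fun k => decide (P k)) : Int) := by
  intro ks
  induction ks with
  | nil => intro _; simp
  | cons a rest ih =>
    intro hsub
    have ha : a ∈ S := hsub a List.mem_cons_self
    have hmap : (fun k => if P k then (((a :: rest).count k : Int)) else 0) =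
        (fun k => (if P k then ((rest.count k : Int)) else 0) +
                  (if P k then (if a = k then (1 : Int) else 0) else 0)) := by
      funext k
      by_cases hP : P k
      · simp only [if_pos hP, List.count_cons]
        by_cases hak : a = k
        · simp [hak]
        · have : ¬ (a == k) = true := by simp [hak]
          simp [hak, this]
      · simp [hP]
    rw [hmap, PySem.List.sum_map_add_int,
        ih (fun x hx => hsub x (List.mem_cons_of_mem _ hx)),
        sum_ite_mem P a S hS ha]
    rw [List.countP_cons]
    by_cases hP : P a <;> simp [hP]

theorem giftOK_keyOf (d : PySem.Dict String Int) (g : String) (h : giftOK d g = true) :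
    ∃ k : Int × Int, keyOf d g = some k ∧ InR d.size k.1 ∧ InR d.size k.2 := by
  unfold giftOK at h
  cases hk : keyOf d g with
  | none => rw [hk] at h; exact absurd h (by simp)
  | some k =>
    rw [hk] at h
    obtain ⟨i, j⟩ := k
    dsimp only at h
    simp only [decide_eq_true_eq] at h
    exact ⟨(i, j), rfl, ⟨by omega, by omega⟩, ⟨by omega, by omega⟩⟩

-- matrices with equal shape and equal entries are equal
theorem mat_ext (n : Nat) (M N : List (List Int))
    (hM1 : M.length = n) (hM2 : ∀ row ∈ M, row.length = n)
    (hN1 : N.length = n) (hN2 : ∀ row ∈ N, row.length = n)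
    (h : ∀ p q : Nat, p < n → q < n → ent M p q = ent N p q) : M = N := by
  apply List.ext_getElem (by omega)
  intro i hi1 hi2
  have hMrow : M[i].length = n := hM2 _ (List.getElem_mem _)
  have hNrow : N[i].length = n := hN2 _ (List.getElem_mem _)
  apply List.ext_getElem (by omega)
  intro j hj1 hj2
  have := h i j (by omega) (by omega)
  unfold ent at this
  rw [List.getElem?_eq_getElem (show i < M.length by omega),
      List.getElem?_eq_getElem (show i < N.length by omega)] at this
  simp only [Option.getD_some] at this
  rw [List.getElem?_eq_getElem (show j < M[i].length by omega),
      List.getElem?_eq_getElem (show j < N[i].length by omega)] at this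
  simpa using this

theorem ent_replicate (n : Nat) (p q : Nat) : ent (List.replicate n (List.replicate n (0 : Int))) p q = 0 := by
  unfold ent
  rw [List.getElem?_replicate]
  by_cases hp : p < n
  · rw [if_pos hp]
    simp only [Option.getD_some]
    rw [List.getElem?_replicate]
    by_cases hq : q < n
    · simp [hq]
    · simp [hq]
  · simp [hp]

theorem sum_map_ite_int {α : Type} (P : α → Prop) [DecidablePred P] (ks : List α) :
    (ks.map (fun k => if P k then (1 : Int) else 0)).sum =
      (ks.countP (fun k => decide (P k)) : Int) := by
  induction ks with
  | nil => simp
  | cons a rest ih =>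
    rw [List.map_cons, List.sum_cons, ih, List.countP_cons]
    by_cases hP : P a
    · simp [hP]
      omega
    · simp [hP]

theorem make_matrix_from_to_eq_fold (friends_dict : List (String × Int)) (gifts : List String) :
    make_matrix_from_to friends_dict gifts =
      ((gifts.filterMap (keyOf (PySem.Dict.ofList friends_dict))).map (fun k => (k, (1 : Int)))).foldl
        (fun res x => addC res x.1.1 x.1.2 x.2)
        (List.replicate (PySem.Dict.ofList friends_dict).size
          (List.replicate (PySem.Dict.ofList friends_dict).size (0 : Int))) := by
  unfold make_matrix_from_to
  dsimp only
  rw [List.foldl_map, List.foldl_filterMap]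
  congr 1
  · funext res gift
    unfold keyOf
    cases hs : PySem.Str.split₀ gift with
    | nil => rfl
    | cons a t =>
      cases t with
      | nil => rfl
      | cons b t2 =>
        cases t2 with
        | cons c t3 => rfl
        | nil =>
          dsimp only
          cases (PySem.Dict.ofList friends_dict).get? a <;>
            cases (PySem.Dict.ofList friends_dict).get? b <;> rfl
  · have hk : (PySem.Dict.ofList friends_dict).keys.length =
        (PySem.Dict.ofList friends_dict).size := by
      simp [PySem.Dict.keys, PySem.Dict.size]
    simp [List.map_const', hk]

theorem make_matrix_from_to_alt_eq_fold (friends_dict : List (String × Int)) (gifts : List String) :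
    make_matrix_from_to_alt friends_dict gifts =
      (PySem.Dict.counter (gifts.filterMap (keyOf (PySem.Dict.ofList friends_dict)))).items.foldl
        (fun res x => addC res x.1.1 x.1.2 x.2)
        (List.replicate (PySem.Dict.ofList friends_dict).size
          (List.replicate (PySem.Dict.ofList friends_dict).size (0 : Int))) := by
  unfold make_matrix_from_to_alt
  dsimp only
  have hcounts : gifts.foldl (fun counts gift =>
      match PySem.Str.split₀ gift with
      | giver :: rest =>
        match rest with
        | [taker] =>
          match ((PySem.Dict.ofList friends_dict).get? giver, (PySem.Dict.ofList friends_dict).get? taker) with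
          | (some f, some t) => counts.insert (f, t) (counts.getD (f, t) 0 + 1)
          | _ => counts
        | _ => counts
      | [] => counts) (PySem.Dict.empty : PySem.Dict (Int × Int) Int) =
      PySem.Dict.counter (gifts.filterMap (keyOf (PySem.Dict.ofList friends_dict))) := by
    rw [← PySem.Dict.foldl_insert_getD_add_one_eq_counter, List.foldl_filterMap]
    congr 1
    funext counts gift
    unfold keyOf
    cases hs : PySem.Str.split₀ gift with
    | nil => rfl
    | cons a t =>
      cases t with
      | nil => rfl
      | cons b t2 =>
        cases t2 with
        | cons c t3 => rfl
        | nil =>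
          dsimp only
          cases (PySem.Dict.ofList friends_dict).get? a <;>
            cases (PySem.Dict.ofList friends_dict).get? b <;> rfl
  rw [hcounts]
  congr 1
  rw [PySem.List.pyRange_zero_natCast, List.map_map]
  simp [Function.comp_def, List.map_const', PySem.List.pyRepeat_singleton]

-- ===== VERDICT (by name: the statement is the Claim_ definition above) =====
theorem make_matrix_from_to_spec : Claim_equal_make_matrix_from_to := by
  intro friends_dict gifts _ hpre
  unfold Spec_make_matrix_from_to
  unfold Pre_make_matrix_from_to at hpre
  have hpre' : ∀ g ∈ gifts, giftOK (PySem.Dict.ofList friends_dict) g = true :=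
    List.all_eq_true.mp hpre
  have hks : ∀ x ∈ gifts.filterMap (keyOf (PySem.Dict.ofList friends_dict)),
      InR (PySem.Dict.ofList friends_dict).size x.1 ∧
      InR (PySem.Dict.ofList friends_dict).size x.2 := by
    intro x hx
    rcases List.mem_filterMap.mp hx with ⟨g, hg, hkg⟩
    rcases giftOK_keyOf _ _ (hpre' g hg) with ⟨k, hk, h1, h2⟩
    rw [hk] at hkg
    cases Option.some.inj hkg
    exact ⟨h1, h2⟩
  rw [make_matrix_from_to_eq_fold, make_matrix_from_to_alt_eq_fold]
  have hinit1 : (List.replicate (PySem.Dict.ofList friends_dict).size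
      (List.replicate (PySem.Dict.ofList friends_dict).size (0 : Int))).length =
      (PySem.Dict.ofList friends_dict).size := by simp
  have hinit2 : ∀ row ∈ List.replicate (PySem.Dict.ofList friends_dict).size
      (List.replicate (PySem.Dict.ofList friends_dict).size (0 : Int)),
      row.length = (PySem.Dict.ofList friends_dict).size := by
    intro row hrow
    rw [List.eq_of_mem_replicate hrow]
    simp
  obtain ⟨a1, a2, a3⟩ := fold_addC (PySem.Dict.ofList friends_dict).size
    ((gifts.filterMap (keyOf (PySem.Dict.ofList friends_dict))).map (fun k => (k, (1 : Int)))) _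
    hinit1 hinit2
    (by
      intro x hx
      rcases List.mem_map.mp hx with ⟨k, hk, hkx⟩
      cases hkx
      exact hks k hk)
  obtain ⟨b1, b2, b3⟩ := fold_addC (PySem.Dict.ofList friends_dict).size
    (PySem.Dict.counter (gifts.filterMap (keyOf (PySem.Dict.ofList friends_dict)))).items _
    hinit1 hinit2
    (by
      intro x hx
      rw [PySem.Dict.items_counter] at hx
      rcases List.mem_map.mp hx with ⟨k, hk, hkx⟩
      cases hkx
      exact hks k ((PySem.Set.mem_ofList _ _).mp hk))
  apply mat_ext (PySem.Dict.ofList friends_dict).size _ _ a1 a2 b1 b2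
  intro p q hp hq
  rw [a3 p q, b3 p q, ent_replicate]
  rw [PySem.Dict.items_counter, List.map_map, List.map_map]
  simp only [Function.comp_def]
  rw [sum_map_ite_int (fun k : Int × Int =>
        normN (PySem.Dict.ofList friends_dict).size k.1 = p ∧
        normN (PySem.Dict.ofList friends_dict).size k.2 = q)]
  rw [countP_eq_sum_counts (fun k : Int × Int =>
        normN (PySem.Dict.ofList friends_dict).size k.1 = p ∧
        normN (PySem.Dict.ofList friends_dict).size k.2 = q)
      (PySem.Set.ofList (gifts.filterMap (keyOf (PySem.Dict.ofList friends_dict))))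
      (PySem.Set.nodup_ofList _)
      (gifts.filterMap (keyOf (PySem.Dict.ofList friends_dict)))
      (fun x hx => (PySem.Set.mem_ofList _ _).mpr hx)]
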